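-- pv_equiv track=rewrite | github.com/TheMLGuy/Kmeans | KMean_Vanilla_Final.py | getCountOfInstancesPerCluster
-- ===== SOURCE A (Python) =====
-- def getCountOfInstancesPerCluster(clusterAssociation):
--     clus0=0
--     clus1=0
--     clus2=0
--     for i,j in enumerate(clusterAssociation):
--         if j==0:
--             clus0+=1
--         elif j==1:
--             clus1+=1
--         else:
--             clus2+=1
--     return(clus0, clus1, clus2)
-- ===== SOURCE B (Python) =====
-- def getCountOfInstancesPerCluster(clusterAssociation):
--     clus0 = clusterAssociation.count(0)
--     clus1 = clusterAssociation.count(1)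
--     return (clus0, clus1, len(clusterAssociation) - clus0 - clus1)
-- ===== Notes on version B (the rewrite author's own statement) =====
-- stated objective: simpler
-- what changed: Replaces the single branching accumulator loop by two list.count scans and derives the third count as length minus the other two (complement), so no per-element branching or else-bucket loop remains.
import Mathlib
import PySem

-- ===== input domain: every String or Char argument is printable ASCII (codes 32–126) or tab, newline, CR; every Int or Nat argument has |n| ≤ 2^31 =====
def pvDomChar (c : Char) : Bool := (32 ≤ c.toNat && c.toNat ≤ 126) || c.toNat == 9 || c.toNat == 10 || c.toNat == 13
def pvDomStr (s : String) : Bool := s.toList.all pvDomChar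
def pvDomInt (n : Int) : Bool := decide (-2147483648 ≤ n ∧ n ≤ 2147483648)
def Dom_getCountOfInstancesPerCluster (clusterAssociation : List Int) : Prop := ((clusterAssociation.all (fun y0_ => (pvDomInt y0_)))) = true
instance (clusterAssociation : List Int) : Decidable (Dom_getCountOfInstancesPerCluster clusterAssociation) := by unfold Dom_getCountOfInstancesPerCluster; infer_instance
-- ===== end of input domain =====

-- ===== PORT A =====
-- Port of A: fold over the list with three accumulators, branching per element.
def getCountOfInstancesPerCluster (clusterAssociation : List Int) : Int × Int × Int :=
  clusterAssociation.foldl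
    (fun s j =>
      if j == 0 then (s.1 + 1, s.2.1, s.2.2)
      else if j == 1 then (s.1, s.2.1 + 1, s.2.2)
      else (s.1, s.2.1, s.2.2 + 1))
    (0, 0, 0)

-- ===== PORT B =====
-- Port of B: two counts plus complement subtraction. One honest line: B is simpler, no branching loop.
def getCountOfInstancesPerCluster_alt (clusterAssociation : List Int) : Int × Int × Int :=
  let clus0 : Int := PySem.List.count clusterAssociation 0
  let clus1 : Int := PySem.List.count clusterAssociation 1
  (clus0, clus1, (clusterAssociation.length : Int) - clus0 - clus1)

-- ===== PRECONDITION & SPEC =====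
def Spec_getCountOfInstancesPerCluster (clusterAssociation : List Int) (out : Int × Int × Int) : Prop := out = getCountOfInstancesPerCluster_alt clusterAssociation
instance (clusterAssociation : List Int) (out : Int × Int × Int) : Decidable (Spec_getCountOfInstancesPerCluster clusterAssociation out) := by unfold Spec_getCountOfInstancesPerCluster; infer_instance

-- ===== CLAIM (what is proved, stated in full; the proofs are below) =====
def Claim_equal_getCountOfInstancesPerCluster : Prop := ∀ (clusterAssociation : List Int), Dom_getCountOfInstancesPerCluster clusterAssociation → Spec_getCountOfInstancesPerCluster clusterAssociation (getCountOfInstancesPerCluster clusterAssociation)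

-- ===== LEMMAS AND PROOFS =====

-- ===== VERDICT (by name: the statement is the Claim_ definition above) =====
lemma pvFold_eq (l : List Int) (a b c : Int) :
    l.foldl
      (fun s j =>
        if j == 0 then (s.1 + 1, s.2.1, s.2.2)
        else if j == 1 then (s.1, s.2.1 + 1, s.2.2)
        else (s.1, s.2.1, s.2.2 + 1))
      (a, b, c)
    = (a + (l.count 0 : Int), b + (l.count 1 : Int),
       c + ((l.length : Int) - (l.count 0 : Int) - (l.count 1 : Int))) := by
  induction l generalizing a b c with
  | nil => simp
  | cons x xs ih =>
      simp only [List.foldl_cons]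
      by_cases h0 : x = 0
      · subst h0
        rw [show ((0:Int) == 0) = true from rfl]
        simp only [if_true]
        rw [ih]
        simp [List.count_cons, Prod.ext_iff]
        omega
      · by_cases h1 : x = 1
        · subst h1
          rw [show ((1:Int) == 0) = false from rfl, show ((1:Int) == 1) = true from rfl]
          simp only [if_true, Bool.false_eq_true, if_false]
          rw [ih]
          simp [List.count_cons, Prod.ext_iff]
          omega
        · have e0 : (x == 0) = false := by simp [h0]
          have e1 : (x == 1) = false := by simp [h1]
          rw [e0, e1]
          simp only [Bool.false_eq_true, if_false]
          rw [ih]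
          simp [List.count_cons, Prod.ext_iff, h0, h1]
          omega

theorem getCountOfInstancesPerCluster_spec : Claim_equal_getCountOfInstancesPerCluster := by
  intro l _
  unfold Spec_getCountOfInstancesPerCluster getCountOfInstancesPerCluster getCountOfInstancesPerCluster_alt
  rw [pvFold_eq]
  simp [PySem.List.count]
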